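-- pv_equiv track=rewrite | github.com/brockobill/ADL | AdelePractice/adele_python_scripting_practice1.13_ANSWER.py | SameAge
-- ===== SOURCE A (Python) =====
-- def SameAge(people):
--   size=len(people)
--   x=0
--   total_age=0
--
--   while x < size:
--     age=list(people.values())[x]
--     total_age=total_age+age
--     x=x+1
--
--   y=0
--   x=0
--   while x < size:
--     age=list(people.values())[x]
--     y=x+1
--     while y < size:
--       if age==list(people.values())[y]:return True
--       y=y+1
--     if age >= (total_age-age) and size!=1:return True
--     x=x+1
--   return False
-- ===== SOURCE B (Python) =====
-- def SameAge(people):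
--     ages = list(people.values())
--     if len(set(ages)) != len(ages):
--         return True
--     return len(ages) > 1 and 2 * max(ages) >= sum(ages)
-- ===== Notes on version B (the rewrite author's own statement) =====
-- stated objective: simpler
-- what changed: Replaces A's quadratic index-based double scan (repeatedly rebuilding list(people.values())) with a set-size duplicate test plus a single max/sum comparison, using that 'some age >= sum of the rest' holds iff it holds for the maximum age.
import Mathlib
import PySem

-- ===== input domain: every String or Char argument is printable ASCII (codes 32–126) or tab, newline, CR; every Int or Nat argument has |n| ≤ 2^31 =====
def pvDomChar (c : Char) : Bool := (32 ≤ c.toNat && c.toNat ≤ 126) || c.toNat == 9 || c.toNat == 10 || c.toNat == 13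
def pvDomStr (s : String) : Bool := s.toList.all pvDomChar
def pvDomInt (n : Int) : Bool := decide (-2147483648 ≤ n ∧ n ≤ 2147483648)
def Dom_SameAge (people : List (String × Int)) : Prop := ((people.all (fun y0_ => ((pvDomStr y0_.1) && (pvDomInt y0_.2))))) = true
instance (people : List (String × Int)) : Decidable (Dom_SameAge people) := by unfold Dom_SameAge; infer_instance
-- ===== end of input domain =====

-- B replaces A's index-based double scan with a set-size duplicate test and one max/sum comparison (simpler, asymptotically faster).

-- ===== PORT A =====
-- first while loop: total_age accumulation over x
def aSumLoop (vals : List Int) (x : Nat) (total : Int) : Int :=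
  if h : x < vals.length then aSumLoop vals (x + 1) (total + vals[x]) else total
termination_by vals.length - x

-- inner while loop over y, returning True on a duplicate of age
def aInner (vals : List Int) (age : Int) (y : Nat) : Bool :=
  if h : y < vals.length then
    if age = vals[y] then true else aInner vals age (y + 1)
  else false
termination_by vals.length - y

-- outer while loop over x
def aOuter (vals : List Int) (total : Int) (x : Nat) : Bool :=
  if h : x < vals.length then
    let age := vals[x]
    if aInner vals age (x + 1) then true
    else if age ≥ total - age ∧ vals.length ≠ 1 then true
    else aOuter vals total (x + 1)
  else false
termination_by vals.length - x

def SameAge (people : List (String × Int)) : Bool :=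
  let vals := (PySem.Dict.ofList people).values
  aOuter vals (aSumLoop vals 0 0) 0

-- ===== PORT B =====
def SameAge_alt (people : List (String × Int)) : Bool :=
  let ages := (PySem.Dict.ofList people).values
  if (PySem.Set.ofList ages).length ≠ ages.length then true
  else
    decide (1 < ages.length) &&
      (match PySem.List.max? ages (fun a => a) with
       | some m => decide (ages.sum ≤ 2 * m)
       | none => false)

-- ===== PRECONDITION & SPEC =====
def Spec_SameAge (people : List (String × Int)) (out : Bool) : Prop := out = SameAge_alt people
instance (people : List (String × Int)) (out : Bool) : Decidable (Spec_SameAge people out) := by unfold Spec_SameAge; infer_instance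

-- ===== CLAIM (what is proved, stated in full; the proofs are below) =====
def Claim_equal_SameAge : Prop := ∀ (people : List (String × Int)), Dom_SameAge people → Spec_SameAge people (SameAge people)

-- ===== LEMMAS AND PROOFS =====

lemma aSumLoop_eq (vals : List Int) : ∀ (x : Nat) (total : Int),
    aSumLoop vals x total = total + (vals.drop x).sum := by
  have key : ∀ (n x : Nat) (total : Int), vals.length - x ≤ n →
      aSumLoop vals x total = total + (vals.drop x).sum := by
    intro n
    induction n with
    | zero =>
      intro x total hx
      unfold aSumLoop
      rw [dif_neg (by omega), List.drop_of_length_le (by omega)]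
      simp
    | succ n ih =>
      intro x total hx
      unfold aSumLoop
      split
      · next h =>
        rw [ih (x + 1) _ (by omega), List.drop_eq_getElem_cons h, List.sum_cons]
        ring
      · next h =>
        rw [List.drop_of_length_le (by omega)]
        simp
  intro x total
  exact key (vals.length - x) x total le_rfl

lemma aInner_eq (vals : List Int) (age : Int) : ∀ (y : Nat),
    aInner vals age y = true ↔ age ∈ vals.drop y := by
  have key : ∀ (n y : Nat), vals.length - y ≤ n → (aInner vals age y = true ↔ age ∈ vals.drop y) := by
    intro n
    induction n with
    | zero =>
      intro y hy
      unfold aInner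
      rw [dif_neg (by omega), List.drop_of_length_le (by omega)]
      simp
    | succ n ih =>
      intro y hy
      unfold aInner
      split
      · next h =>
        rw [List.drop_eq_getElem_cons h]
        by_cases hv : age = vals[y]
        · rw [if_pos hv]
          refine iff_of_true rfl ?_
          rw [hv]
          exact List.mem_cons_self
        · rw [if_neg hv, ih (y + 1) (by omega), List.mem_cons]
          constructor
          · exact fun h' => Or.inr h'
          · rintro (h' | h')
            · exact absurd h' hv
            · exact h'
      · next h =>
        rw [List.drop_of_length_le (by omega)]
        simp
  intro y
  exact key (vals.length - y) y le_rfl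

lemma aOuter_eq (vals : List Int) (total : Int) : ∀ (x : Nat),
    aOuter vals total x = true ↔
      ∃ i, ∃ h : i < vals.length, x ≤ i ∧
        (vals[i] ∈ vals.drop (i + 1) ∨ (vals[i] ≥ total - vals[i] ∧ vals.length ≠ 1)) := by
  have key : ∀ (n x : Nat), vals.length - x ≤ n → (aOuter vals total x = true ↔
      ∃ i, ∃ h : i < vals.length, x ≤ i ∧
        (vals[i] ∈ vals.drop (i + 1) ∨ (vals[i] ≥ total - vals[i] ∧ vals.length ≠ 1))) := by
    intro n
    induction n with
    | zero =>
      intro x hx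
      unfold aOuter
      rw [dif_neg (by omega)]
      constructor
      · intro h; exact absurd h (by simp)
      · rintro ⟨i, hi, hxi, _⟩; omega
    | succ n ih =>
      intro x hx
      unfold aOuter
      split
      · next h =>
        by_cases hdup : aInner vals vals[x] (x + 1) = true
        · rw [if_pos hdup]
          exact iff_of_true rfl ⟨x, h, le_rfl, Or.inl ((aInner_eq vals vals[x] (x + 1)).mp hdup)⟩
        · rw [if_neg hdup]
          by_cases hsum : vals[x] ≥ total - vals[x] ∧ vals.length ≠ 1
          · rw [if_pos hsum]
            exact iff_of_true rfl ⟨x, h, le_rfl, Or.inr hsum⟩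
          · rw [if_neg hsum, ih (x + 1) (by omega)]
            constructor
            · rintro ⟨i, hi, hxi, hc⟩
              exact ⟨i, hi, by omega, hc⟩
            · rintro ⟨i, hi, hxi, hc⟩
              rcases Nat.eq_or_lt_of_le hxi with heq | hlt
              · subst heq
                rcases hc with hc | hc
                · exact absurd ((aInner_eq vals vals[x] (x + 1)).mpr hc) hdup
                · exact absurd hc hsum
              · exact ⟨i, hi, by omega, hc⟩
      · next h =>
        constructor
        · intro hfalse; exact absurd hfalse (by simp)
        · rintro ⟨i, hi, hxi, _⟩; omega
  intro x
  exact key (vals.length - x) x le_rfl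

-- the existential duplicate condition of A's inner loop is exactly non-Nodup
lemma dup_iff (vals : List Int) :
    (∃ i, ∃ h : i < vals.length, vals[i] ∈ vals.drop (i + 1)) ↔ ¬ vals.Nodup := by
  rw [List.nodup_iff_getElem?_ne_getElem?]
  push Not
  constructor
  · rintro ⟨i, hi, hmem⟩
    rw [List.mem_iff_getElem] at hmem
    obtain ⟨j, hj, hje⟩ := hmem
    rw [List.length_drop] at hj
    refine ⟨i, i + 1 + j, by omega, by omega, ?_⟩
    have : (vals.drop (i + 1))[j]? = vals[i + 1 + j]? := List.getElem?_drop
    rw [List.getElem?_eq_getElem hi, ← this, List.getElem?_eq_getElem (by rw [List.length_drop]; omega), hje]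
  · rintro ⟨i, j, hij, hj, hcontra⟩
    have hi : i < vals.length := by omega
    rw [List.getElem?_eq_getElem hi, List.getElem?_eq_getElem hj] at hcontra
    refine ⟨i, hi, ?_⟩
    rw [List.mem_iff_getElem]
    refine ⟨j - (i + 1), by rw [List.length_drop]; omega, ?_⟩
    have hfix : (vals.drop (i + 1))[j - (i + 1)]? = vals[(i + 1) + (j - (i + 1))]? := List.getElem?_drop
    have : (i + 1) + (j - (i + 1)) = j := by omega
    rw [this, List.getElem?_eq_getElem (by rw [List.length_drop]; omega), List.getElem?_eq_getElem hj] at hfix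
    have := Option.some.inj hfix
    rw [this]
    exact (Option.some.inj hcontra).symm

-- set(ages) has the same size as ages exactly when ages has no duplicates
lemma length_ofList_eq_iff (vals : List Int) :
    (PySem.Set.ofList vals).length = vals.length ↔ vals.Nodup := by
  constructor
  · induction vals with
    | nil => intro _; exact List.nodup_nil
    | cons x xs ih =>
      rw [PySem.Set.ofList_cons]
      intro h
      simp only [List.length_cons] at h
      have hle1 : (PySem.Set.discard (PySem.Set.ofList xs) x).length ≤ (PySem.Set.ofList xs).length :=
        List.length_filter_le _ _
      have hle2 : (PySem.Set.ofList xs).length ≤ xs.length := PySem.Set.length_ofList_le xs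
      have hdisc : (PySem.Set.discard (PySem.Set.ofList xs) x).length = xs.length := by omega
      have hnd : xs.Nodup := ih (by omega)
      rw [List.nodup_cons]
      refine ⟨?_, hnd⟩
      intro hmem
      have hmem' : x ∈ PySem.Set.ofList xs := (PySem.Set.mem_ofList _ _).mpr hmem
      have hne : PySem.Set.discard (PySem.Set.ofList xs) x ≠ PySem.Set.ofList xs := by
        intro he
        have hx2 : x ∈ PySem.Set.discard (PySem.Set.ofList xs) x := by rw [he]; exact hmem'
        rw [PySem.Set.mem_discard] at hx2
        exact hx2.2 rfl
      have hlt : (PySem.Set.discard (PySem.Set.ofList xs) x).length < (PySem.Set.ofList xs).length := by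
        rcases Nat.lt_or_ge (PySem.Set.discard (PySem.Set.ofList xs) x).length (PySem.Set.ofList xs).length with hl | hl
        · exact hl
        · exact absurd (List.Sublist.eq_of_length_le (List.filter_sublist) hl) hne
      omega
  · intro h
    rw [PySem.Set.ofList_eq_self_of_nodup vals h]

-- B's max/sum test is A's existential sum test
lemma maxTest_iff (vals : List Int) :
    ((decide (1 < vals.length) &&
      (match PySem.List.max? vals (fun a => a) with
       | some m => decide (vals.sum ≤ 2 * m)
       | none => false)) = true)
    ↔ (vals.length ≠ 1 ∧ ∃ a ∈ vals, vals.sum - a ≤ a) := by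
  rcases h : PySem.List.max? vals (fun a => a) with _ | m
  · have hnil : vals = [] := (PySem.List.max?_eq_none_iff vals (fun a => a)).mp h
    subst hnil
    simp
  · have hm : m ∈ vals := PySem.List.max?_mem h
    have hmax : ∀ y ∈ vals, y ≤ m := by
      intro y hy
      exact PySem.List.max?_isMax h y hy
    have hpos : 0 < vals.length := List.length_pos_of_mem hm
    simp only [Bool.and_eq_true, decide_eq_true_eq]
    constructor
    · rintro ⟨h1, h2⟩
      exact ⟨by omega, m, hm, by omega⟩
    · rintro ⟨h1, a, ha, hs⟩
      have := hmax a ha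
      exact ⟨by omega, by omega⟩

-- per-element assembly: A's whole loop equals B's body on any values list
lemma main_eq (vals : List Int) :
    aOuter vals (aSumLoop vals 0 0) 0 =
      (if (PySem.Set.ofList vals).length ≠ vals.length then true
       else
         decide (1 < vals.length) &&
           (match PySem.List.max? vals (fun a => a) with
            | some m => decide (vals.sum ≤ 2 * m)
            | none => false)) := by
  have htotal : aSumLoop vals 0 0 = vals.sum := by
    rw [aSumLoop_eq]; simp
  rw [htotal, Bool.eq_iff_iff, aOuter_eq]
  by_cases hnd : vals.Nodup
  · rw [if_neg (show ¬ (PySem.Set.ofList vals).length ≠ vals.length from fun hne => hne ((length_ofList_eq_iff vals).mpr hnd)), maxTest_iff]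
    constructor
    · rintro ⟨i, hi, -, hc | hc⟩
      · exact absurd hnd ((dup_iff vals).mp ⟨i, hi, hc⟩)
      · exact ⟨hc.2, vals[i], List.getElem_mem hi, by omega⟩
    · rintro ⟨h1, a, ha, hs⟩
      rw [List.mem_iff_getElem] at ha
      obtain ⟨i, hi, rfl⟩ := ha
      exact ⟨i, hi, Nat.zero_le i, Or.inr ⟨by omega, h1⟩⟩
  · rw [if_pos (show (PySem.Set.ofList vals).length ≠ vals.length from fun he => hnd ((length_ofList_eq_iff vals).mp he))]
    simp only [iff_true]
    obtain ⟨i, hi, hmem⟩ := (dup_iff vals).mpr hnd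
    exact ⟨i, hi, Nat.zero_le i, Or.inl hmem⟩

-- ===== VERDICT (by name: the statement is the Claim_ definition above) =====
theorem SameAge_spec : Claim_equal_SameAge := by
  intro people _
  unfold Spec_SameAge SameAge SameAge_alt
  exact main_eq ((PySem.Dict.ofList people).values)
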